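-- pv_equiv track=rewrite | github.com/jquiaot/glowing-winner-leetcode | leetcode/1930__unique_length_3_palindromic_subsequences.py | countPalindromicSubsequence1
-- ===== SOURCE A (Python) =====
-- def countPalindromicSubsequence1(s: str) -> int:
--     """
--     - Start from left i = 0
--     - If we've seen s[i], go to next char
--     - Otherwise
--       - Start from right j = len(s) - 1
--       - Decrementing j, try to find s[j] == s[i]
--       - If found, count unique chars in s from i+1 to j-1, and add that
--         to count
--       - If j gets down to i + 1 without match, can't make 3-char palindrome
--         any more, so go to next ith char
--     """
--     numPalindromicSubsequences = 0
--     i = 0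
--     firstCharSeen = set()
--     while i < len(s) - 2:
--         if s[i] not in firstCharSeen:
--             firstCharSeen.add(s[i])
--             j = len(s) - 1
--             while j >= i + 2:
--                 if s[j] == s[i]:
--                     uniqueChars = set(s[i + 1:j])
--                     numPalindromicSubsequences += len(uniqueChars)
--                     break
--                 j -= 1
--         i += 1
--     return numPalindromicSubsequences
-- ===== SOURCE B (Python) =====
-- def countPalindromicSubsequence1(s: str) -> int:
--     remaining = {}
--     for ch in s:
--         remaining[ch] = remaining.get(ch, 0) + 1
--     seen = set()
--     pairs = set()
--     for m in s:
--         remaining[m] -= 1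
--         for c in seen:
--             if remaining[c] > 0:
--                 pairs.add((c, m))
--         seen.add(m)
--     return len(pairs)
-- ===== Notes on version B (the rewrite author's own statement) =====
-- stated objective: alternative
-- what changed: Replaces A's per-first-character right-to-left scans and between-slice counting by a single left-to-right pass over middle positions: a suffix multiset of remaining characters and a prefix seen-set, collecting every valid (outer, inner) pair into a set and returning its size.
import Mathlib
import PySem

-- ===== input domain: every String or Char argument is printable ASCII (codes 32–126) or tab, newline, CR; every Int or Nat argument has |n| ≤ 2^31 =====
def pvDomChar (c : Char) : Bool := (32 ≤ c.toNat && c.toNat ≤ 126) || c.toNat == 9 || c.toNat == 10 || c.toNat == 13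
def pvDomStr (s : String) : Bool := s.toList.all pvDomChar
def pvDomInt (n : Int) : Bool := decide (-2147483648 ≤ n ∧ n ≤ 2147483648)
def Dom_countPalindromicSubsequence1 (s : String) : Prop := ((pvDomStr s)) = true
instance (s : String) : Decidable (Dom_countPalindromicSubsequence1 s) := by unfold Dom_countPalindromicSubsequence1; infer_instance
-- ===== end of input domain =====

-- B replaces A's per-first-character right-to-left scans and slice counting by a single
-- left-to-right middle-character pass over a suffix multiset and a prefix seen-set (alternative; same cost).

-- ===== PORT A =====
-- inner while: j from len(s)-1 down while j >= i + 2, break on s[j] == s[i]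
def pvInnerA (l : List Char) (c : Char) (i : Nat) (j : Nat) : Int :=
  if _h : i + 2 ≤ j then
    if l.getD j ' ' = c then
      ((PySem.Set.ofList (PySem.List.slice l (some ((i : Int) + 1)) (some (j : Int)))).length : Int)
    else pvInnerA l c i (j - 1)
  else 0
termination_by j
decreasing_by omega

-- outer while: i from 0 while i < len(s) - 2, with the firstCharSeen set
def pvLoopA (l : List Char) (i : Nat) (seen : PySem.Set Char) (acc : Int) : Int :=
  if _h : (i : Int) < (l.length : Int) - 2 then
    let c := l.getD i ' '
    if PySem.Set.contains seen c then pvLoopA l (i + 1) seen acc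
    else pvLoopA l (i + 1) (PySem.Set.add seen c) (acc + pvInnerA l c i (l.length - 1))
  else acc
termination_by l.length - i
decreasing_by all_goals omega

def countPalindromicSubsequence1 (s : String) : Int :=
  pvLoopA s.toList 0 PySem.Set.empty 0

-- ===== PORT B =====
-- body of 'for m in s': remaining[m] -= 1 (m is always a key, so getD reads the stored count);
-- then 'for c in seen: if remaining[c] > 0: pairs.add((c, m))'; then seen.add(m)
def pvStepB (st : PySem.Dict Char Int × PySem.Set Char × PySem.Set (Char × Char)) (m : Char) :
    PySem.Dict Char Int × PySem.Set Char × PySem.Set (Char × Char) :=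
  let rem := st.1.insert m (st.1.getD m 0 - 1)
  let pairs := st.2.1.foldl
    (fun (ps : PySem.Set (Char × Char)) c => if rem.getD c 0 > 0 then PySem.Set.add ps (c, m) else ps)
    st.2.2
  (rem, PySem.Set.add st.2.1 m, pairs)

def countPalindromicSubsequence1_alt (s : String) : Int :=
  let l := s.toList
  -- remaining = {}; for ch in s: remaining[ch] = remaining.get(ch, 0) + 1
  let remaining := l.foldl (fun (d : PySem.Dict Char Int) ch => d.insert ch (d.getD ch 0 + 1)) PySem.Dict.empty
  -- seen = set(); pairs = set(); for m in s: …
  let st := l.foldl pvStepB (remaining, PySem.Set.empty, PySem.Set.empty)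
  (st.2.2.length : Int)

-- ===== PRECONDITION & SPEC =====
def Spec_countPalindromicSubsequence1 (s : String) (out : Int) : Prop := out = countPalindromicSubsequence1_alt s
instance (s : String) (out : Int) : Decidable (Spec_countPalindromicSubsequence1 s out) := by unfold Spec_countPalindromicSubsequence1; infer_instance

-- ===== CLAIM (what is proved, stated in full; the proofs are below) =====
def Claim_equal_countPalindromicSubsequence1 : Prop := ∀ (s : String), Dom_countPalindromicSubsequence1 s → Spec_countPalindromicSubsequence1 s (countPalindromicSubsequence1 s)


-- ===== LEMMAS AND PROOFS =====

-- per-character contribution of A: the number of distinct chars strictly between the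
-- first and last occurrence of c (proof-side bridge between the two programs)
def pvContrib (l : List Char) (c : Char) : Int :=
  let first : Int := ((PySem.List.index? l c).getD 0 : Nat)
  let last : Int := (l.length : Int) - 1 - (((PySem.List.index? l.reverse c).getD 0 : Nat) : Int)
  if last - first ≥ 2 then
    ((PySem.Set.ofList (PySem.List.slice l (some (first + 1)) (some last))).length : Int)
  else 0

-- the first occurrence of c is at index ≥ i when c does not occur among the first i characters
lemma pv_first_ge (l : List Char) (c : Char) (i f : Nat)
    (hf : PySem.List.index? l c = some f) (hni : c ∉ l.take i) : i ≤ f := by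
  by_contra hlt
  rw [not_le] at hlt
  obtain ⟨hk, hget, -⟩ := PySem.List.getElem_of_index?_eq_some hf
  have hmem : l[f] ∈ l.take i := by
    have h : (l.take i)[f]'(by rw [List.length_take]; exact lt_min hlt hk) = l[f] := List.getElem_take
    exact h ▸ List.getElem_mem _
  exact hni (hget ▸ hmem)

-- index? of l[i] is exactly i when l[i] is unseen among the first i characters
lemma pv_index?_eq (l : List Char) (i : Nat) (hi : i < l.length)
    (hni : l[i] ∉ l.take i) : PySem.List.index? l (l[i]) = some i := by
  rw [PySem.List.index?_eq_some_iff]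
  refine ⟨l.take i, l.drop (i + 1), ?_, by simp [Nat.min_eq_left hi.le], hni⟩
  conv_lhs => rw [← List.take_append_drop i l, List.drop_eq_getElem_cons hi]

-- membership in a prefix is 'strictly after the first occurrence'
lemma pv_mem_take_iff (l : List Char) (c : Char) (f q : Nat)
    (hf : PySem.List.index? l c = some f) : c ∈ l.take q ↔ f < q := by
  obtain ⟨hk, hget, hmin⟩ := PySem.List.getElem_of_index?_eq_some hf
  constructor
  · intro hmem
    obtain ⟨j, hj, hgj⟩ := List.getElem_of_mem hmem
    rw [List.length_take] at hj
    rw [List.getElem_take] at hgj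
    by_contra h
    exact hmin j (by omega) hgj
  · intro hfq
    have : (l.take q)[f]'(by rw [List.length_take]; exact lt_min hfq hk) = l[f] := List.getElem_take
    exact hget ▸ this ▸ List.getElem_mem _

-- the last occurrence of c ∈ l, located via index? on the reversed list
lemma pv_last_spec (l : List Char) (c : Char) (hc : c ∈ l) :
    ∃ r : Nat, PySem.List.index? l.reverse c = some r ∧ r < l.length ∧
      l.getD (l.length - 1 - r) ' ' = c ∧
      ∀ m, l.length - 1 - r < m → m < l.length → l.getD m ' ' ≠ c := by
  have hrev : c ∈ l.reverse := by simpa using hc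
  obtain ⟨r, hr⟩ := Option.isSome_iff_exists.mp ((PySem.List.index?_isSome_iff _ _).mpr hrev)
  obtain ⟨hk, hget, hmin⟩ := PySem.List.getElem_of_index?_eq_some hr
  have hrl : r < l.length := by simpa using hk
  have hgr : l.reverse[r]'hk = l[l.length - 1 - r]'(by omega) := List.getElem_reverse _
  refine ⟨r, hr, hrl, ?_, ?_⟩
  · rw [List.getD_eq_getElem _ _ (by omega : l.length - 1 - r < l.length), ← hgr, hget]
  · intro m hm hml hcm
    have hj : l.length - 1 - m < r := by omega
    have : l.reverse[l.length - 1 - m]'(by simp; omega) = l[m]'hml := by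
      rw [List.getElem_reverse]
      congr 1
      omega
    refine hmin _ hj ?_
    rw [this, ← List.getD_eq_getElem _ ' ' hml]
    exact hcm

-- membership in a suffix is 'strictly before the last occurrence'
lemma pv_mem_drop_iff (l : List Char) (c : Char) (q r : Nat)
    (hc : c ∈ l)
    (hr : PySem.List.index? l.reverse c = some r) :
    c ∈ l.drop (q + 1) ↔ q < l.length - 1 - r := by
  obtain ⟨r', hr', hrl, hget, hlast⟩ := pv_last_spec l c hc
  rw [hr] at hr'
  injection hr' with hrr
  subst hrr
  constructor
  · intro hmem
    obtain ⟨j, hj, hgj⟩ := List.getElem_of_mem hmem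
    rw [List.getElem_drop] at hgj
    by_contra h
    rw [not_lt] at h
    have hne := hlast (q + 1 + j) (by omega) (by rw [List.length_drop] at hj; omega)
    rw [List.getD_eq_getElem _ _ (by rw [List.length_drop] at hj; omega)] at hne
    exact hne hgj
  · intro hq
    have hL : l.length - 1 - r < l.length := by omega
    rw [List.getD_eq_getElem _ _ hL] at hget
    have : (l.drop (q + 1))[l.length - 1 - r - (q + 1)]'(by rw [List.length_drop]; omega) = c := by
      rw [List.getElem_drop]
      convert hget using 2
      omega
    exact this ▸ List.getElem_mem _

-- A's inner right-to-left scan finds the last occurrence R (or nothing if R < i + 2)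
lemma pv_innerA_eq (l : List Char) (c : Char) (i R : Nat)
    (hcR : l.getD R ' ' = c)
    (hlast : ∀ m, R < m → m < l.length → l.getD m ' ' ≠ c) :
    ∀ j, R ≤ j → j < l.length →
      pvInnerA l c i j =
        if 2 ≤ (R : Int) - (i : Int) then
          ((PySem.Set.ofList (PySem.List.slice l (some ((i : Int) + 1)) (some (R : Int)))).length : Int)
        else 0 := by
  intro j
  induction j with
  | zero =>
    intro hRj hjl
    have hR0 : R = 0 := Nat.le_zero.mp hRj
    subst hR0
    rw [pvInnerA, dif_neg (by omega), if_neg (by omega)]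
  | succ j ih =>
    intro hRj hjl
    rw [pvInnerA]
    by_cases hij : i + 2 ≤ j + 1
    · rw [dif_pos hij]
      by_cases hRe : R = j + 1
      · subst hRe
        rw [if_pos hcR, if_pos (by omega)]
      · have hne : l.getD (j + 1) ' ' ≠ c := hlast (j + 1) (by omega) hjl
        rw [if_neg hne]
        simpa using ih (by omega) (by omega)
    · rw [dif_neg hij, if_neg (by omega)]

-- pvContrib equals A's inner scan started at the first occurrence
lemma pv_contrib_eq_inner (l : List Char) (c : Char) (i : Nat)
    (hf : PySem.List.index? l c = some i) :
    pvContrib l c = pvInnerA l c i (l.length - 1) := by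
  have hcl : c ∈ l := (PySem.List.index?_isSome_iff l c).mp (by rw [hf]; rfl)
  obtain ⟨r, hr, hrl, hget, hlast⟩ := pv_last_spec l c hcl
  obtain ⟨hilt, hgeti, -⟩ := PySem.List.getElem_of_index?_eq_some hf
  have hiR : i ≤ l.length - 1 - r := by
    by_contra h
    rw [not_le] at h
    exact hlast i h hilt (by rw [List.getD_eq_getElem _ _ hilt]; exact hgeti)
  rw [pv_innerA_eq l c i (l.length - 1 - r) hget hlast (l.length - 1) (by omega) (by omega)]
  have hcast : ((l.length - 1 - r : Nat) : Int) = (l.length : Int) - 1 - (r : Int) := by omega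
  simp only [pvContrib, hf, hr, Option.getD_some, hcast, ge_iff_le]

-- characters first occurring at index ≥ len - 2 contribute nothing
lemma pv_contrib_zero (l : List Char) (c : Char) (i : Nat)
    (hcl : c ∈ l) (hni : c ∉ l.take i)
    (hbig : ¬ ((i : Int) < (l.length : Int) - 2)) :
    pvContrib l c = 0 := by
  obtain ⟨f, hf⟩ := Option.isSome_iff_exists.mp ((PySem.List.index?_isSome_iff l c).mpr hcl)
  have hif := pv_first_ge l c i f hf hni
  simp only [pvContrib, hf, Option.getD_some]
  rw [if_neg (by omega)]

-- loop invariant for A: seen = chars of l.take i; the loop adds the contribution of every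
-- character whose first occurrence lies at index ≥ i
lemma pv_loopA_eq (l : List Char) :
    ∀ (k i : Nat) (seen : PySem.Set Char) (acc : Int),
      l.length - i ≤ k →
      (∀ c : Char, c ∈ seen ↔ c ∈ l.take i) →
      pvLoopA l i seen acc =
        acc + ∑ c ∈ ((l.drop i).toFinset \ (l.take i).toFinset), pvContrib l c := by
  intro k
  induction k with
  | zero =>
    intro i seen acc hk hseen
    rw [pvLoopA, dif_neg (by omega)]
    rw [List.drop_eq_nil_of_le (by omega)]
    simp
  | succ k ih =>
    intro i seen acc hk hseen
    rw [pvLoopA]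
    by_cases h : (i : Int) < (l.length : Int) - 2
    · rw [dif_pos h]
      have hi : i < l.length := by omega
      have hgd : l.getD i ' ' = l[i] := List.getD_eq_getElem l ' ' hi
      have hdropF : (l.drop i).toFinset = insert (l[i]) (l.drop (i + 1)).toFinset := by
        rw [List.drop_eq_getElem_cons hi, List.toFinset_cons]
      have htake : l.take (i + 1) = l.take i ++ [l[i]] := List.take_succ_eq_append_getElem hi
      have htakeF : (l.take (i + 1)).toFinset = insert (l[i]) (l.take i).toFinset := by
        rw [htake]
        ext x
        simp only [List.mem_toFinset, Finset.mem_insert, List.mem_append, List.mem_singleton]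
        tauto
      by_cases hc : PySem.Set.contains seen (l.getD i ' ')
      · rw [if_pos hc]
        have hmem : l[i] ∈ (l.take i).toFinset := by
          rw [List.mem_toFinset, ← hgd, ← hseen]
          exact (PySem.Set.contains_iff _ _).mp hc
        have hinv : ∀ d : Char, d ∈ seen ↔ d ∈ l.take (i + 1) := by
          intro d
          rw [hseen d, htake]
          constructor
          · intro hd
            exact List.mem_append.mpr (Or.inl hd)
          · intro hd
            rcases List.mem_append.mp hd with hd | hd
            · exact hd
            · rw [List.mem_singleton.mp hd]
              exact List.mem_toFinset.mp hmem
        rw [ih (i + 1) seen acc (by omega) hinv]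
        rw [hdropF, htakeF, Finset.insert_eq_self.mpr hmem, Finset.insert_sdiff_of_mem _ hmem]
      · rw [if_neg hc]
        have hnmem : l[i] ∉ (l.take i).toFinset := by
          rw [List.mem_toFinset]
          intro hx
          exact hc ((PySem.Set.contains_iff _ _).mpr ((hseen _).mpr (hgd ▸ hx)))
        have hinv : ∀ d : Char, d ∈ PySem.Set.add seen (l.getD i ' ') ↔ d ∈ l.take (i + 1) := by
          intro d
          rw [PySem.Set.mem_add, hseen d, htake]
          simp only [List.mem_append, List.mem_singleton, hgd]
        rw [ih (i + 1) _ _ (by omega) hinv]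
        have hidx : PySem.List.index? l (l[i]) = some i :=
          pv_index?_eq l i hi (fun hx => hnmem (List.mem_toFinset.mpr hx))
        have hins : insert (l[i]) ((l.drop (i + 1)).toFinset \ (l.take i).toFinset)
            = insert (l[i]) (((l.drop (i + 1)).toFinset \ (l.take i).toFinset).erase (l[i])) := by
          ext x
          simp only [Finset.mem_insert, Finset.mem_erase]
          tauto
        rw [hgd, hdropF, htakeF, Finset.sdiff_insert, Finset.insert_sdiff_of_notMem _ hnmem,
          hins, Finset.sum_insert (Finset.notMem_erase _ _),
          pv_contrib_eq_inner l (l[i]) i hidx]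
        ring
    · rw [dif_neg h]
      have hz : ∑ c ∈ ((l.drop i).toFinset \ (l.take i).toFinset), pvContrib l c = 0 := by
        apply Finset.sum_eq_zero
        intro c hcmem
        simp only [Finset.mem_sdiff, List.mem_toFinset] at hcmem
        exact pv_contrib_zero l c i (List.mem_of_mem_drop hcmem.1) hcmem.2 h
      omega

-- ===== B-side lemmas =====

-- the middle-character finset of c: distinct chars strictly between first and last occurrence
def pvMid (l : List Char) (c : Char) : Finset Char :=
  (PySem.List.slice l (some ((((PySem.List.index? l c).getD 0 : Nat) : Int) + 1))
      (some ((l.length : Int) - 1 - (((PySem.List.index? l.reverse c).getD 0 : Nat) : Int)))).toFinset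

lemma pv_mid_eq (l : List Char) (c : Char) (f r : Nat)
    (hf : PySem.List.index? l c = some f)
    (hr : PySem.List.index? l.reverse c = some r) (hrl : r < l.length) :
    pvMid l c = ((l.drop (f + 1)).take (l.length - 1 - r - (f + 1))).toFinset := by
  unfold pvMid
  rw [hf, hr]
  simp only [Option.getD_some]
  have h1 : ((f : Int) + 1) = ((f + 1 : Nat) : Int) := by push_cast; ring
  have h2 : ((l.length : Int) - 1 - (r : Int)) = ((l.length - 1 - r : Nat) : Int) := by omega
  rw [h1, h2, PySem.List.slice_natCast]

lemma pv_contrib_eq_card (l : List Char) (c : Char) (hc : c ∈ l) :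
    pvContrib l c = ((pvMid l c).card : Int) := by
  obtain ⟨f, hf⟩ := Option.isSome_iff_exists.mp ((PySem.List.index?_isSome_iff l c).mpr hc)
  obtain ⟨r, hr, hrl, -, -⟩ := pv_last_spec l c hc
  rw [pv_mid_eq l c f r hf hr hrl]
  unfold pvContrib
  rw [hf, hr]
  simp only [Option.getD_some]
  have h1 : ((f : Int) + 1) = ((f + 1 : Nat) : Int) := by push_cast; ring
  have h2 : ((l.length : Int) - 1 - (r : Int)) = ((l.length - 1 - r : Nat) : Int) := by omega
  by_cases hcond : (l.length : Int) - 1 - (r : Int) - (f : Int) ≥ 2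
  · rw [if_pos hcond, h1, h2, PySem.List.slice_natCast]
    have hnd := PySem.Set.nodup_ofList ((l.drop (f + 1)).take (l.length - 1 - r - (f + 1)))
    have hFeq : (PySem.Set.ofList ((l.drop (f + 1)).take (l.length - 1 - r - (f + 1)))).toFinset
        = ((l.drop (f + 1)).take (l.length - 1 - r - (f + 1))).toFinset := by
      ext x
      simp only [List.mem_toFinset]
      exact PySem.Set.mem_ofList _ x
    rw [← hFeq, List.toFinset_card_of_nodup hnd]
  · rw [if_neg hcond]
    have hz : l.length - 1 - r - (f + 1) = 0 := by omega
    rw [hz]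
    simp

lemma pv_mem_mid_iff (l : List Char) (c : Char) (hc : c ∈ l) (m : Char) :
    m ∈ pvMid l c ↔ ∃ q, q < l.length ∧ l.getD q ' ' = m ∧ c ∈ l.take q ∧ c ∈ l.drop (q + 1) := by
  obtain ⟨f, hf⟩ := Option.isSome_iff_exists.mp ((PySem.List.index?_isSome_iff l c).mpr hc)
  obtain ⟨r, hr, hrl, -, -⟩ := pv_last_spec l c hc
  rw [pv_mid_eq l c f r hf hr hrl, List.mem_toFinset]
  have hmid : m ∈ (l.drop (f + 1)).take (l.length - 1 - r - (f + 1)) ↔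
      ∃ q, f < q ∧ q < l.length - 1 - r ∧ l.getD q ' ' = m := by
    constructor
    · intro hmem
      obtain ⟨j, hj, hgj⟩ := List.getElem_of_mem hmem
      rw [List.length_take, List.length_drop] at hj
      rw [List.getElem_take, List.getElem_drop] at hgj
      refine ⟨f + 1 + j, by omega, by omega, ?_⟩
      rw [List.getD_eq_getElem _ _ (by omega)]
      exact hgj
    · rintro ⟨q, hfq, hqL, hgq⟩
      have hql : q < l.length := by omega
      rw [List.getD_eq_getElem _ _ hql] at hgq
      have : ((l.drop (f + 1)).take (l.length - 1 - r - (f + 1)))[q - (f + 1)]'(by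
          rw [List.length_take, List.length_drop]; omega) = m := by
        rw [List.getElem_take, List.getElem_drop]
        convert hgq using 2
        omega
      exact this ▸ List.getElem_mem _
  rw [hmid]
  constructor
  · rintro ⟨q, hfq, hqL, hgq⟩
    exact ⟨q, by omega, hgq, (pv_mem_take_iff l c f q hf).mpr hfq,
      (pv_mem_drop_iff l c q r hc hr).mpr hqL⟩
  · rintro ⟨q, hql, hgq, htq, hdq⟩
    exact ⟨q, (pv_mem_take_iff l c f q hf).mp htq, (pv_mem_drop_iff l c q r hc hr).mp hdq, hgq⟩

-- inner fold over seen: membership and nodup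
lemma pv_innerB_mem (rem : PySem.Dict Char Int) (m : Char) :
    ∀ (cs : List Char) (ps : PySem.Set (Char × Char)) (p : Char × Char),
      p ∈ cs.foldl (fun (ps : PySem.Set (Char × Char)) c =>
          if rem.getD c 0 > 0 then PySem.Set.add ps (c, m) else ps) ps ↔
        p ∈ ps ∨ ∃ c ∈ cs, rem.getD c 0 > 0 ∧ p = (c, m) := by
  intro cs
  induction cs with
  | nil => simp
  | cons c cs ih =>
    intro ps p
    simp only [List.foldl_cons, ih, List.mem_cons]
    by_cases h : rem.getD c 0 > 0
    · rw [if_pos h]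
      rw [PySem.Set.mem_add]
      constructor
      · rintro (⟨hp | hp⟩ | ⟨d, hd, hdp⟩)
        · exact Or.inl hp
        · exact Or.inr ⟨c, Or.inl rfl, h, hp⟩
        · exact Or.inr ⟨d, Or.inr hd, hdp⟩
      · rintro (hp | ⟨d, (rfl | hd), hdp, rfl⟩)
        · exact Or.inl (Or.inl hp)
        · exact Or.inl (Or.inr rfl)
        · exact Or.inr ⟨d, hd, hdp, rfl⟩
    · rw [if_neg h]
      constructor
      · rintro (hp | ⟨d, hd, hdp⟩)
        · exact Or.inl hp
        · exact Or.inr ⟨d, Or.inr hd, hdp⟩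
      · rintro (hp | ⟨d, (rfl | hd), hdp, rfl⟩)
        · exact Or.inl hp
        · exact absurd hdp h
        · exact Or.inr ⟨d, hd, hdp, rfl⟩

lemma pv_innerB_nodup (rem : PySem.Dict Char Int) (m : Char) :
    ∀ (cs : List Char) (ps : PySem.Set (Char × Char)), ps.Nodup →
      (cs.foldl (fun (ps : PySem.Set (Char × Char)) c =>
          if rem.getD c 0 > 0 then PySem.Set.add ps (c, m) else ps) ps).Nodup := by
  intro cs
  induction cs with
  | nil => intro ps h; exact h
  | cons c cs ih =>
    intro ps h
    simp only [List.foldl_cons]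
    apply ih
    by_cases hc : rem.getD c 0 > 0
    · rw [if_pos hc]; exact PySem.Set.nodup_add _ _ h
    · rw [if_neg hc]; exact h

-- main loop invariant for B
lemma pv_loopB (l : List Char) :
    ∀ (suf pre : List Char) (rem : PySem.Dict Char Int) (seen : PySem.Set Char)
      (pairs : PySem.Set (Char × Char)),
      l = pre ++ suf →
      (∀ c, rem.getD c 0 = (suf.count c : Int)) →
      (∀ c, c ∈ seen ↔ c ∈ pre) →
      pairs.Nodup →
      (∀ p : Char × Char, p ∈ pairs ↔ ∃ q, q < pre.length ∧ l.getD q ' ' = p.2 ∧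
        p.1 ∈ l.take q ∧ p.1 ∈ l.drop (q + 1)) →
      (suf.foldl pvStepB (rem, seen, pairs)).2.2.Nodup ∧
      (∀ p : Char × Char, p ∈ (suf.foldl pvStepB (rem, seen, pairs)).2.2 ↔
        ∃ q, q < l.length ∧ l.getD q ' ' = p.2 ∧ p.1 ∈ l.take q ∧ p.1 ∈ l.drop (q + 1)) := by
  intro suf
  induction suf with
  | nil =>
    intro pre rem seen pairs hl hrem hseen hnd hpairs
    refine ⟨hnd, fun p => ?_⟩
    simp only [List.foldl_nil]
    rw [hpairs p, show l = pre by simpa using hl]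
  | cons m suf ih =>
    intro pre rem seen pairs hl hrem hseen hnd hpairs
    simp only [List.foldl_cons]
    have hlenl : pre.length < l.length := by rw [hl]; simp
    have htake : l.take pre.length = pre := by rw [hl, List.take_left]
    have hdropPre : l.drop pre.length = m :: suf := by rw [hl, List.drop_left]
    have hdrop : l.drop (pre.length + 1) = suf := by
      rw [show pre.length + 1 = pre.length + 1 from rfl, ← List.drop_drop, hdropPre]
      rfl
    have hgetm : l.getD pre.length ' ' = m := by
      rw [hl, List.getD_eq_getElem _ _ (by simp)]
      simp
    set rem' := rem.insert m (rem.getD m 0 - 1) with hrem'def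
    have hrem' : ∀ c, rem'.getD c 0 = (suf.count c : Int) := by
      intro c
      rw [hrem'def, PySem.Dict.getD_insert]
      split_ifs with hcm
      · subst hcm
        rw [hrem]
        simp
      · rw [hrem]
        have hmc : ¬ m = c := fun h => hcm h.symm
        simp [hmc]
    have hstep : pvStepB (rem, seen, pairs) m =
        (rem', PySem.Set.add seen m,
          seen.foldl (fun (ps : PySem.Set (Char × Char)) c =>
            if rem'.getD c 0 > 0 then PySem.Set.add ps (c, m) else ps) pairs) := rfl
    rw [hstep]
    apply ih (pre ++ [m])
    · rw [hl]; simp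
    · exact hrem'
    · intro c
      rw [PySem.Set.mem_add, hseen]
      simp
    · exact pv_innerB_nodup rem' m seen pairs hnd
    · intro p
      rw [pv_innerB_mem rem' m seen pairs p, hpairs p]
      have hnewcase : (∃ c ∈ seen, rem'.getD c 0 > 0 ∧ p = (c, m)) ↔
          (l.getD pre.length ' ' = p.2 ∧ p.1 ∈ l.take pre.length ∧ p.1 ∈ l.drop (pre.length + 1)) := by
        constructor
        · rintro ⟨c, hc, hcpos, rfl⟩
          refine ⟨hgetm, ?_, ?_⟩
          · rw [htake]; exact (hseen c).mp hc
          · rw [hdrop, ← List.count_pos_iff]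
            rw [hrem' c] at hcpos
            exact_mod_cast hcpos
        · rintro ⟨hpm, hp1, hp2⟩
          refine ⟨p.1, (hseen p.1).mpr (htake ▸ hp1), ?_, ?_⟩
          · rw [hrem' p.1]
            rw [hdrop] at hp2
            have := List.count_pos_iff.mpr hp2
            exact_mod_cast this
          · have h2 : p.2 = m := by rw [← hpm, hgetm]
            rw [← h2]
      constructor
      · rintro (hold | hnew)
        · obtain ⟨q, hq, hrest⟩ := hold
          exact ⟨q, by simp; omega, hrest⟩
        · exact ⟨pre.length, by simp, hnewcase.mp hnew⟩
      · rintro ⟨q, hq, hrest⟩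
        simp only [List.length_append, List.length_singleton] at hq
        rcases Nat.lt_succ_iff_lt_or_eq.mp hq with hq' | rfl
        · exact Or.inl ⟨q, hq', hrest⟩
        · exact Or.inr (hnewcase.mpr hrest)

-- the partition of the pair set by its first component
lemma pv_pairs_card (l : List Char) (pairs : PySem.Set (Char × Char))
    (hnd : pairs.Nodup)
    (hmem : ∀ p : Char × Char, p ∈ pairs ↔
      ∃ q, q < l.length ∧ l.getD q ' ' = p.2 ∧ p.1 ∈ l.take q ∧ p.1 ∈ l.drop (q + 1)) :
    (pairs.length : Int) = ∑ c ∈ l.toFinset, pvContrib l c := by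
  have hF : pairs.toFinset = l.toFinset.biUnion (fun c => {c} ×ˢ pvMid l c) := by
    ext p
    rw [List.mem_toFinset, hmem p, Finset.mem_biUnion]
    constructor
    · rintro ⟨q, hq, hgq, htq, hdq⟩
      have hp1l : p.1 ∈ l := List.mem_of_mem_take htq
      refine ⟨p.1, List.mem_toFinset.mpr hp1l, ?_⟩
      rw [Finset.mem_product]
      exact ⟨Finset.mem_singleton_self _,
        (pv_mem_mid_iff l p.1 hp1l p.2).mpr ⟨q, hq, hgq, htq, hdq⟩⟩
    · rintro ⟨c, hcl, hp⟩
      rw [Finset.mem_product, Finset.mem_singleton] at hp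
      obtain ⟨hp1, hp2⟩ := hp
      subst hp1
      exact (pv_mem_mid_iff l p.1 (List.mem_toFinset.mp hcl) p.2).mp hp2
  have hdisj : ∀ c ∈ l.toFinset, ∀ c' ∈ l.toFinset, c ≠ c' →
      Disjoint ({c} ×ˢ pvMid l c) ({c'} ×ˢ pvMid l c') := by
    intro c _ c' _ hne
    rw [Finset.disjoint_left]
    intro p hp hp'
    rw [Finset.mem_product, Finset.mem_singleton] at hp hp'
    exact hne (hp.1.symm.trans hp'.1)
  have hlen : pairs.length = pairs.toFinset.card := (List.toFinset_card_of_nodup hnd).symm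
  rw [hlen, hF, Finset.card_biUnion hdisj]
  push_cast
  refine Finset.sum_congr rfl ?_
  intro c hcl
  rw [Finset.card_product, Finset.card_singleton, one_mul,
    pv_contrib_eq_card l c (List.mem_toFinset.mp hcl)]

-- ===== VERDICT (by name: the statement is the Claim_ definition above) =====
theorem countPalindromicSubsequence1_spec : Claim_equal_countPalindromicSubsequence1 := by
  intro s _
  unfold Spec_countPalindromicSubsequence1
  unfold countPalindromicSubsequence1 countPalindromicSubsequence1_alt
  rw [pv_loopA_eq s.toList s.toList.length 0 PySem.Set.empty 0 (by omega)
    (by intro c; simp [PySem.Set.empty])]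
  have hcnt : ∀ c, (s.toList.foldl (fun (d : PySem.Dict Char Int) ch =>
      d.insert ch (d.getD ch 0 + 1)) PySem.Dict.empty).getD c 0 = (s.toList.count c : Int) := by
    intro c
    rw [PySem.Dict.getD_foldl_insert_add_one]
    simp [PySem.Dict.empty, PySem.Dict.getD, PySem.Dict.get?]
  obtain ⟨hnd, hmem⟩ := pv_loopB s.toList s.toList [] _ PySem.Set.empty PySem.Set.empty
    rfl hcnt (by intro c; simp [PySem.Set.empty]) (by simp [PySem.Set.empty])
    (by intro p; simp [PySem.Set.empty])
  rw [pv_pairs_card s.toList _ hnd hmem]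
  simp
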